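-- pv_equiv track=rewrite | github.com/jojoldu/algorithm-study | week-4/sgkim-jaehasafe.py | get_min_dial_cnt
-- ===== SOURCE A (Python) =====
-- def get_partial_match(N):
--     m = len(N)
--     pi = m * [0]
--     begin, matched = 1, 0
--     for i in range(1, m):
--         while matched > 0 and N[i] != N[matched]:
--             matched = pi[matched - 1]
--         if N[i] == N[matched]:
--             matched += 1
--             pi[i] = matched
--     return pi
--
-- def kmp_search(H, N):
--     n, m = len(H), len(N)
--     ret = []
--     pi = get_partial_match(N)
--     matched = 0
--     for i in range(n):
--         while matched > 0 and H[i] != N[matched]: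
--             matched = pi[matched - 1]
--         if H[i] == N[matched]:
--             matched += 1
--             if matched == m:
--                 ret.append(i - m + 1)
--                 matched = pi[matched - 1]
--     return ret
--
-- def get_min_dial_cnt(states):
--     min_dial_cnt = 0
--
--     for i in range(len(states) - 1):
--         if i % 2 == 0:
--             min_dial_cnt += kmp_search(states[i + 1] + states[i + 1], states[i])[0]
--         else:
--             min_dial_cnt += kmp_search(states[i] + states[i], states[i + 1])[0]
--
--     return min_dial_cnt
-- ===== SOURCE B (Python) =====
-- def get_min_dial_cnt(states):
--     total = 0
--     for i in range(len(states) - 1):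
--         a, b = states[i], states[i + 1]
--         total += (b + b).index(a) if i % 2 == 0 else (a + a).index(b)
--     return total
-- ===== Notes on version B (the rewrite author's own statement) =====
-- stated objective: simpler
-- what changed: The hand-written KMP machinery (get_partial_match + kmp_search, then taking result[0]) is deleted and each pair's rotation offset is obtained directly as the library first-occurrence search str.index on the doubled string.
import Mathlib
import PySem

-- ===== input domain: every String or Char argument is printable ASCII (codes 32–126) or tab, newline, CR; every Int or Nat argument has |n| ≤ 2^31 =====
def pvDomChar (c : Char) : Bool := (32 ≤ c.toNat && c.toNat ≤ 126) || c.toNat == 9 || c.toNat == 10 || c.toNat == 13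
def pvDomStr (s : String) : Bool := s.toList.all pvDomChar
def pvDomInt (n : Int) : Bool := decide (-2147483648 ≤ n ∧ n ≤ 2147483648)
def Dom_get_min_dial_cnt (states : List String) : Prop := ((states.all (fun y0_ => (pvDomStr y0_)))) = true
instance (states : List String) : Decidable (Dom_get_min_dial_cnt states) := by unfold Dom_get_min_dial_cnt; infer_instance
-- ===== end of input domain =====

-- B replaces A's hand-written KMP machinery by the library first-occurrence substring search
-- on the doubled string (objective: simpler); equality is proved on Pre_, where A returns.

-- ===== PORT A =====
-- the `while matched > 0 and X[i] != N[matched]` loop of both helpers; the fuel argument is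
-- always passed as the current `matched`, which suffices because `matched` strictly
-- decreases (proved in kmpFall_spec below), so this computes exactly the Python loop
def kmpFall (N : List Char) (pi : List Nat) (c : Char) : Nat → Nat → Nat
  | 0, matched => matched
  | fuel+1, matched =>
    if 0 < matched ∧ N.getD matched ' ' ≠ c then
      kmpFall N pi c fuel (pi.getD (matched - 1) 0)
    else matched

-- body of the `for i in range(1, m)` loop of get_partial_match
def pmStep (N : List Char) (st : List Nat × Nat) (i : Nat) : List Nat × Nat :=
  let matched := kmpFall N st.1 (N.getD i ' ') st.2 st.2
  if N.getD i ' ' = N.getD matched ' ' then (st.1.set i (matched + 1), matched + 1)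
  else (st.1, matched)

def get_partial_match (N : List Char) : List Nat :=
  ((List.range' 1 (N.length - 1)).foldl (pmStep N) (List.replicate N.length 0, 0)).1

-- body of the `for i in range(n)` loop of kmp_search
def searchStep (H N : List Char) (pi : List Nat) (st : List Nat × Nat) (i : Nat) : List Nat × Nat :=
  let matched := kmpFall N pi (H.getD i ' ') st.2 st.2
  if H.getD i ' ' = N.getD matched ' ' then
    if matched + 1 = N.length then (st.1 ++ [i + 1 - N.length], pi.getD (N.length - 1) 0)
    else (st.1, matched + 1)
  else (st.1, matched)

def kmp_search (H N : List Char) : List Nat :=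
  ((List.range H.length).foldl (searchStep H N (get_partial_match N)) ([], 0)).1

-- `kmp_search(...)[0]` is ported as `.headD 0`, total; Pre_ guarantees the list is non-empty
def get_min_dial_cnt (states : List String) : Int :=
  (List.range (states.length - 1)).foldl
    (fun acc i =>
      if i % 2 = 0 then
        acc + ((kmp_search ((states.getD (i+1) "").toList ++ (states.getD (i+1) "").toList)
                 (states.getD i "").toList).headD 0 : Int)
      else
        acc + ((kmp_search ((states.getD i "").toList ++ (states.getD i "").toList)
                 (states.getD (i+1) "").toList).headD 0 : Int))
    0

-- ===== PORT B =====
-- `(b + b).index(a)` is ported as PySem.Chars.find, exact where the substring occurs (which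
-- Pre_ guarantees; where Python's .index raises ValueError, Pre_ excludes the input)
def get_min_dial_cnt_alt (states : List String) : Int :=
  (List.range (states.length - 1)).foldl
    (fun total i =>
      let a := (states.getD i "").toList
      let b := (states.getD (i+1) "").toList
      total + (if i % 2 = 0 then PySem.Chars.find (b ++ b) a else PySem.Chars.find (a ++ a) b))
    0

-- ===== PRECONDITION & SPEC =====
-- Pre_ = exactly the inputs where A returns: for every adjacent pair the pattern string is
-- non-empty (A's N[0] raises IndexError on an empty pattern) and occurs in the doubled
-- neighbour (otherwise kmp_search returns [] and A's [0] raises IndexError)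
def Pre_get_min_dial_cnt (states : List String) : Prop :=
  ∀ i ∈ List.range (states.length - 1),
    if i % 2 = 0 then
      (states.getD i "").toList ≠ [] ∧
      (states.getD i "").toList <:+: ((states.getD (i+1) "").toList ++ (states.getD (i+1) "").toList)
    else
      (states.getD (i+1) "").toList ≠ [] ∧
      (states.getD (i+1) "").toList <:+: ((states.getD i "").toList ++ (states.getD i "").toList)
instance (states : List String) : Decidable (Pre_get_min_dial_cnt states) := by
  unfold Pre_get_min_dial_cnt; infer_instance

def pvWitness_get_min_dial_cnt : List String := ["12", "21"]

def Spec_get_min_dial_cnt (states : List String) (out : Int) : Prop := out = get_min_dial_cnt_alt states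
instance (states : List String) (out : Int) : Decidable (Spec_get_min_dial_cnt states out) := by
  unfold Spec_get_min_dial_cnt; infer_instance

-- ===== CLAIM (what is proved, stated in full; the proofs are below) =====
def Claim_equal_get_min_dial_cnt : Prop := ∀ (states : List String), Dom_get_min_dial_cnt states → Pre_get_min_dial_cnt states → Spec_get_min_dial_cnt states (get_min_dial_cnt states)


-- ===== LEMMAS AND PROOFS =====

-- the longest proper border of N.take l: the greatest k < l with N.take k a suffix of N.take l
def brd (N : List Char) (l : Nat) : Nat :=
  Nat.findGreatest (fun k => k < l ∧ N.take k <:+ N.take l) l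

lemma brd_lt (N : List Char) (l : Nat) (hl : 0 < l) : brd N l < l := by
  have h := Nat.findGreatest_spec (P := fun k => k < l ∧ N.take k <:+ N.take l) (m := 0)
    (Nat.zero_le l) ⟨hl, List.nil_suffix⟩
  exact h.1

lemma brd_suffix (N : List Char) (l : Nat) : N.take (brd N l) <:+ N.take l := by
  rcases Nat.eq_zero_or_pos l with h | h
  · subst h; rw [brd, Nat.findGreatest_zero]
  · have hh := Nat.findGreatest_spec (P := fun k => k < l ∧ N.take k <:+ N.take l) (m := 0)
      (Nat.zero_le l) ⟨h, List.nil_suffix⟩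
    exact hh.2

lemma le_brd (N : List Char) {l k : Nat} (hk : k < l) (h : N.take k <:+ N.take l) : k ≤ brd N l :=
  Nat.le_findGreatest (P := fun k => k < l ∧ N.take k <:+ N.take l) (le_of_lt hk) ⟨hk, h⟩

lemma take_snoc (N : List Char) {k : Nat} (hk : k < N.length) :
    N.take (k+1) = N.take k ++ [N.getD k ' '] := by
  rw [List.take_add_one, List.getElem?_eq_getElem hk, List.getD_eq_getElem N ' ' hk]
  rfl

lemma suffix_snoc_iff {s t : List Char} {a b : Char} :
    s ++ [a] <:+ t ++ [b] ↔ s <:+ t ∧ a = b := by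
  constructor
  · intro h
    obtain ⟨u, hu⟩ := h
    rw [← List.append_assoc] at hu
    obtain ⟨h1, h2⟩ := List.append_inj' hu rfl
    have hab : a = b := by simpa using h2
    exact ⟨⟨u, h1⟩, hab⟩
  · intro h
    obtain ⟨⟨u, hu⟩, hab⟩ := h
    subst hab
    exact ⟨u, by rw [← List.append_assoc, hu]⟩

-- a prefix of N of length k ≥ 1 is a suffix of P ++ [c] iff its front is a suffix of P and
-- its last character is c
lemma ext_suffix (N P : List Char) (c : Char) {k : Nat} (hk1 : 1 ≤ k) (hk2 : k ≤ N.length) :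
    (N.take k <:+ P ++ [c]) ↔ (N.take (k-1) <:+ P ∧ N.getD (k-1) ' ' = c) := by
  have hklt : k - 1 < N.length := by omega
  have hts : N.take k = N.take (k-1) ++ [N.getD (k-1) ' '] := by
    conv_lhs => rw [show k = (k-1)+1 by omega]
    exact take_snoc N hklt
  rw [hts, suffix_snoc_iff]

-- correctness of the fuelled while-loop: starting from j ≤ fuel with N.take j a suffix of the
-- processed text P and maximal among extendable candidates, it stops at a value j' ≤ j that
-- is still a suffix of P, still dominates every candidate extendable by c, and satisfies the
-- Python loop's exit condition
lemma kmpFall_spec (N : List Char) (pi : List Nat) (c : Char) (P : List Char) (C : Nat)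
    (hC : C ≤ N.length) :
    ∀ (fuel j : Nat), j ≤ fuel → j < N.length → j < C →
      (∀ t, t < j → pi.getD t 0 = brd N (t+1)) →
      N.take j <:+ P →
      (∀ k, 1 ≤ k → k ≤ C → N.take k <:+ P ++ [c] → k - 1 ≤ j) →
      (kmpFall N pi c fuel j ≤ j) ∧
      (N.take (kmpFall N pi c fuel j) <:+ P) ∧
      (∀ k, 1 ≤ k → k ≤ C → N.take k <:+ P ++ [c] → k ≤ kmpFall N pi c fuel j + 1) ∧
      (kmpFall N pi c fuel j = 0 ∨ N.getD (kmpFall N pi c fuel j) ' ' = c) := by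
  intro fuel
  induction fuel with
  | zero =>
    intro j hfj hjN hjC hpi hsuf hmax
    have hj0 : j = 0 := by omega
    subst hj0
    exact ⟨le_refl _, hsuf, fun k h1 h2 h3 => by have := hmax k h1 h2 h3; omega, Or.inl rfl⟩
  | succ fuel ih =>
    intro j hfj hjN hjC hpi hsuf hmax
    by_cases hcond : 0 < j ∧ N.getD j ' ' ≠ c
    · have hunf : kmpFall N pi c (fuel+1) j = kmpFall N pi c fuel (pi.getD (j-1) 0) := by
        simp only [kmpFall, if_pos hcond]
      have hj₂ : pi.getD (j-1) 0 = brd N j := by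
        have := hpi (j-1) (by omega)
        rwa [show j-1+1 = j by omega] at this
      have hlt : pi.getD (j-1) 0 < j := by rw [hj₂]; exact brd_lt N j hcond.1
      have hsuf₂ : N.take (pi.getD (j-1) 0) <:+ P := by
        rw [hj₂]; exact (brd_suffix N j).trans hsuf
      have hmax₂ : ∀ k, 1 ≤ k → k ≤ C → N.take k <:+ P ++ [c] → k - 1 ≤ pi.getD (j-1) 0 := by
        intro k h1 h2 h3
        have hkm : k ≤ N.length := le_trans h2 hC
        obtain ⟨hpre, hch⟩ := (ext_suffix N P c h1 hkm).1 h3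
        have hk1j : k - 1 ≤ j := hmax k h1 h2 h3
        have hk1lt : k - 1 < j := by
          rcases Nat.lt_or_ge (k-1) j with h | h
          · exact h
          · exfalso
            have hkj : k - 1 = j := by omega
            rw [hkj] at hch
            exact hcond.2 hch
        have hss : N.take (k-1) <:+ N.take j :=
          List.suffix_of_suffix_length_le hpre hsuf (by simp [List.length_take]; omega)
        rw [hj₂]
        exact le_brd N hk1lt hss
      obtain ⟨h1, h2, h3, h4⟩ := ih (pi.getD (j-1) 0) (by omega) (by omega) (by omega)
        (fun t ht => hpi t (by omega)) hsuf₂ hmax₂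
      rw [hunf]
      exact ⟨by omega, h2, h3, h4⟩
    · have hunf : kmpFall N pi c (fuel+1) j = j := by
        simp only [kmpFall, if_neg hcond]
      rw [hunf]
      refine ⟨le_refl _, hsuf, fun k h1 h2 h3 => by have := hmax k h1 h2 h3; omega, ?_⟩
      rcases Nat.eq_zero_or_pos j with h | h
      · exact Or.inl h
      · right
        by_contra hne
        exact hcond ⟨h, hne⟩

-- one whole loop iteration (while-loop plus the matching test): the new `matched` is the
-- longest k ≤ C with N.take k a suffix of P ++ [c]
lemma kmpStep_spec (N : List Char) (pi : List Nat) (c : Char) (P : List Char) (C : Nat)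
    (hC : C ≤ N.length) {j : Nat} (hjN : j < N.length) (hjC : j < C)
    (hpi : ∀ t, t < j → pi.getD t 0 = brd N (t+1))
    (hsuf : N.take j <:+ P)
    (hmax : ∀ k, 1 ≤ k → k ≤ C → N.take k <:+ P ++ [c] → k - 1 ≤ j) :
    ((if c = N.getD (kmpFall N pi c j j) ' ' then kmpFall N pi c j j + 1 else kmpFall N pi c j j) ≤ C) ∧
    (N.take (if c = N.getD (kmpFall N pi c j j) ' ' then kmpFall N pi c j j + 1 else kmpFall N pi c j j) <:+ P ++ [c]) ∧
    (∀ k, k ≤ C → N.take k <:+ P ++ [c] →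
      k ≤ (if c = N.getD (kmpFall N pi c j j) ' ' then kmpFall N pi c j j + 1 else kmpFall N pi c j j)) ∧
    ((if c = N.getD (kmpFall N pi c j j) ' ' then kmpFall N pi c j j + 1 else kmpFall N pi c j j) = 0 ∨
      c = N.getD (kmpFall N pi c j j) ' ') := by
  obtain ⟨h1, h2, h3, h4⟩ := kmpFall_spec N pi c P C hC j j (le_refl j) hjN hjC hpi hsuf hmax
  by_cases hc : c = N.getD (kmpFall N pi c j j) ' '
  · simp only [if_pos hc]
    refine ⟨by omega, ?_, ?_, Or.inr hc⟩
    · rw [ext_suffix N P c (by omega) (by omega)]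
      exact ⟨by simpa using h2, by simpa using hc.symm⟩
    · intro k hk hsfx
      rcases Nat.eq_zero_or_pos k with h | h
      · omega
      · exact h3 k h hk hsfx
  · simp only [if_neg hc]
    have hj0 : kmpFall N pi c j j = 0 := by
      rcases h4 with h | h
      · exact h
      · exact absurd h.symm hc
    refine ⟨by omega, by rw [hj0]; simp only [List.take_zero]; exact List.nil_suffix, ?_, Or.inl hj0⟩
    intro k hk hsfx
    rcases Nat.eq_zero_or_pos k with h | h
    · omega
    · have hk1 := h3 k h hk hsfx
      have hkm : k ≤ N.length := le_trans hk hC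
      obtain ⟨_, hch⟩ := (ext_suffix N P c h hkm).1 hsfx
      rw [hj0] at hk1
      have hkone : k = 1 := by omega
      rw [hkone] at hch
      simp only [Nat.sub_self] at hch
      rw [hj0] at hc
      exact absurd hch.symm hc

-- invariant of the get_partial_match loop: after processing indices 1..k, matched is the
-- longest proper border of N.take (k+1), the first k+1 entries of pi are the border table
-- and the remaining entries are still 0
lemma pm_invariant (N : List Char) : ∀ k, k ≤ N.length - 1 →
    (((List.range' 1 k).foldl (pmStep N) (List.replicate N.length 0, 0)).1.length = N.length) ∧
    (((List.range' 1 k).foldl (pmStep N) (List.replicate N.length 0, 0)).2 = brd N (k+1)) ∧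
    (∀ t, t < k+1 →
      ((List.range' 1 k).foldl (pmStep N) (List.replicate N.length 0, 0)).1.getD t 0 = brd N (t+1)) ∧
    (∀ t, k+1 ≤ t →
      ((List.range' 1 k).foldl (pmStep N) (List.replicate N.length 0, 0)).1.getD t 0 = 0) := by
  intro k
  induction k with
  | zero =>
    intro _
    have hb1 : brd N 1 = 0 := by have := brd_lt N 1 (by omega); omega
    simp only [List.range'_zero, List.foldl_nil]
    refine ⟨by simp, by simpa using hb1.symm, ?_, ?_⟩
    · intro t ht
      have ht0 : t = 0 := by omega
      subst ht0
      rcases Nat.eq_zero_or_pos N.length with h | h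
      · simp [List.getD, h, hb1]
      · rw [List.getD_replicate _ h, hb1]
    · intro t _
      rw [List.getD_eq_getElem?_getD, List.getElem?_replicate]
      split <;> rfl
  | succ k ih =>
    intro hk1
    obtain ⟨ihlen, ihm, ihpi, ihz⟩ := ih (by omega)
    set st := (List.range' 1 k).foldl (pmStep N) (List.replicate N.length 0, 0) with hst
    have hfold : (List.range' 1 (k+1)).foldl (pmStep N) (List.replicate N.length 0, 0)
        = pmStep N st (1+k) := by
      rw [List.range'_1_concat, List.foldl_append]
      rfl
    have hik : 1 + k = k + 1 := by omega
    rw [hik] at hfold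
    have hiN : k + 1 < N.length := by omega
    have h1i : 1 ≤ k + 1 := by omega
    have hbl := brd_lt N (k+1) h1i
    have hmaxstep : ∀ k', 1 ≤ k' → k' ≤ k + 1 →
        N.take k' <:+ N.take (k+1) ++ [N.getD (k+1) ' '] → k' - 1 ≤ st.2 := by
      intro k' h1 h2 h3
      obtain ⟨hpre, _⟩ := (ext_suffix N (N.take (k+1)) (N.getD (k+1) ' ') h1 (by omega)).1 h3
      have := le_brd N (show k' - 1 < k + 1 by omega) hpre
      omega
    have hstep := kmpStep_spec N st.1 (N.getD (k+1) ' ') (N.take (k+1)) (k+1) (by omega)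
      (j := st.2) (by omega) (by omega)
      (fun t ht => ihpi t (by omega)) (by rw [ihm]; exact brd_suffix N (k+1)) hmaxstep
    set j' := kmpFall N st.1 (N.getD (k+1) ' ') st.2 st.2 with hj'
    set M := if N.getD (k+1) ' ' = N.getD j' ' ' then j' + 1 else j' with hMdef
    obtain ⟨hM1, hM2, hM3, hM4⟩ := hstep
    have hPc : N.take (k+1) ++ [N.getD (k+1) ' '] = N.take (k+1+1) := (take_snoc N hiN).symm
    rw [hPc] at hM2 hM3
    have hMbrd : M = brd N (k+1+1) := by
      have hle : M ≤ brd N (k+1+1) := le_brd N (by omega) hM2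
      have hge : brd N (k+1+1) ≤ M := by
        apply hM3
        · have := brd_lt N (k+1+1) (by omega); omega
        · exact brd_suffix N (k+1+1)
      omega
    have hpm : pmStep N st (k+1) =
        (if N.getD (k+1) ' ' = N.getD j' ' ' then (st.1.set (k+1) (j'+1), j'+1) else (st.1, j')) := rfl
    rw [hfold, hpm]
    by_cases hc : N.getD (k+1) ' ' = N.getD j' ' '
    · rw [if_pos hc]
      have hMval : M = j' + 1 := by rw [hMdef, if_pos hc]
      have hMb : j' + 1 = brd N (k+1+1) := hMval ▸ hMbrd
      refine ⟨by simp [ihlen], hMb, ?_, ?_⟩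
      · intro t ht
        by_cases hti : t = k + 1
        · subst hti
          show (st.1.set (k+1) (j'+1)).getD (k+1) 0 = brd N (k+1+1)
          rw [List.getD_eq_getElem?_getD, List.getElem?_set, if_pos rfl, if_pos (by omega)]
          simpa using hMb
        · show (st.1.set (k+1) (j'+1)).getD t 0 = brd N (t+1)
          rw [List.getD_eq_getElem?_getD, List.getElem?_set, if_neg (by omega),
            ← List.getD_eq_getElem?_getD]
          exact ihpi t (by omega)
      · intro t ht
        show (st.1.set (k+1) (j'+1)).getD t 0 = 0
        rw [List.getD_eq_getElem?_getD, List.getElem?_set, if_neg (by omega),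
          ← List.getD_eq_getElem?_getD]
        exact ihz t (by omega)
    · rw [if_neg hc]
      have hMval : M = j' := by rw [hMdef, if_neg hc]
      have hM0 : M = 0 := by
        rcases hM4 with h | h
        · exact h
        · exact absurd h hc
      have hbz : brd N (k+1+1) = 0 := by omega
      refine ⟨ihlen, by show j' = brd N (k+1+1); omega, ?_, ?_⟩
      · intro t ht
        by_cases hti : t = k + 1
        · subst hti
          show st.1.getD (k+1) 0 = brd N (k+1+1)
          rw [hbz]
          exact ihz (k+1) (le_refl _)
        · show st.1.getD t 0 = brd N (t+1)
          exact ihpi t (by omega)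
      · intro t ht
        show st.1.getD t 0 = 0
        exact ihz t (by omega)

lemma get_partial_match_spec (N : List Char) :
    ((get_partial_match N).length = N.length) ∧
    (∀ t, t < N.length → (get_partial_match N).getD t 0 = brd N (t+1)) := by
  obtain ⟨h1, _, h3, _⟩ := pm_invariant N (N.length - 1) (le_refl _)
  unfold get_partial_match
  exact ⟨h1, fun t ht => h3 t (by omega)⟩

-- N is a suffix of H.take l iff there is an occurrence of N at position l - |N|
lemma suffix_take_iff (H N : List Char) {l : Nat} (hm : N.length ≤ l) (hl : l ≤ H.length) :
    N <:+ H.take l ↔ N <+: H.drop (l - N.length) := by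
  have hdecomp : H.take l = H.take (l - N.length) ++ (H.drop (l - N.length)).take N.length := by
    rw [← List.take_add]
    congr 1
    omega
  constructor
  · intro h
    have h2 : (H.drop (l - N.length)).take N.length <:+ H.take l :=
      ⟨H.take (l - N.length), hdecomp.symm⟩
    have hlen2 : ((H.drop (l - N.length)).take N.length).length = N.length := by
      simp [List.length_take, List.length_drop]
      omega
    have hs : N <:+ (H.drop (l - N.length)).take N.length :=
      List.suffix_of_suffix_length_le h h2 (by rw [hlen2])
    have heq : N = (H.drop (l - N.length)).take N.length :=
      hs.eq_of_length (by rw [hlen2])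
    have := List.take_prefix N.length (H.drop (l - N.length))
    rwa [← heq] at this
  · intro h
    have heq : N = (H.drop (l - N.length)).take N.length := by
      rw [List.prefix_iff_eq_take] at h
      exact h
    rw [hdecomp]
    nth_rewrite 1 [heq]
    exact List.suffix_append _ _

-- invariant of the kmp_search loop: matched is the longest k < |N| with N.take k a suffix of
-- the processed prefix, and ret is the list of all occurrence positions found so far
lemma search_invariant (H N : List Char) (hN : N ≠ []) : ∀ i, i ≤ H.length →
    ((((List.range i).foldl (searchStep H N (get_partial_match N)) ([], 0)).2 < N.length) ∧
     (N.take (((List.range i).foldl (searchStep H N (get_partial_match N)) ([], 0)).2) <:+ H.take i) ∧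
     (∀ k, k < N.length → N.take k <:+ H.take i →
        k ≤ ((List.range i).foldl (searchStep H N (get_partial_match N)) ([], 0)).2) ∧
     (((List.range i).foldl (searchStep H N (get_partial_match N)) ([], 0)).1 =
        (List.range (i + 1 - N.length)).filter (fun j => decide (N <+: H.drop j)))) := by
  have hm1 : 0 < N.length := List.length_pos_of_ne_nil hN
  obtain ⟨hpilen, hpicor⟩ := get_partial_match_spec N
  intro i
  induction i with
  | zero =>
    intro _
    refine ⟨hm1, by simp only [List.take_zero]; exact List.nil_suffix, ?_, by rw [show 0 + 1 - N.length = 0 by omega]; rfl⟩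
    intro k hk hs
    simp only [List.take_zero] at hs
    rcases List.take_eq_nil_iff.1 (List.suffix_nil.1 hs) with h | h
    · omega
    · exact absurd h hN
  | succ i ih =>
    intro hi1
    obtain ⟨ih1, ih2, ih3, ih4⟩ := ih (by omega)
    set st := (List.range i).foldl (searchStep H N (get_partial_match N)) ([], 0) with hst
    have hfold : (List.range (i+1)).foldl (searchStep H N (get_partial_match N)) ([], 0)
        = searchStep H N (get_partial_match N) st i := by
      rw [List.range_succ, List.foldl_append]
      rfl
    have hiH : i < H.length := by omega
    have hmaxstep : ∀ k, 1 ≤ k → k ≤ N.length →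
        N.take k <:+ H.take i ++ [H.getD i ' '] → k - 1 ≤ st.2 := by
      intro k h1 h2 h3
      obtain ⟨hpre, _⟩ := (ext_suffix N (H.take i) (H.getD i ' ') h1 h2).1 h3
      exact ih3 (k-1) (by omega) hpre
    have hstep := kmpStep_spec N (get_partial_match N) (H.getD i ' ') (H.take i) N.length
      (le_refl _) (j := st.2) ih1 ih1 (fun t ht => hpicor t (by omega)) ih2 hmaxstep
    set j' := kmpFall N (get_partial_match N) (H.getD i ' ') st.2 st.2 with hj'
    set M := if H.getD i ' ' = N.getD j' ' ' then j' + 1 else j' with hMdef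
    obtain ⟨hM1, hM2, hM3, hM4⟩ := hstep
    have hPc : H.take i ++ [H.getD i ' '] = H.take (i+1) := (take_snoc H hiH).symm
    rw [hPc] at hM2 hM3
    have hnogrow : M < N.length →
        (List.range (i + 1 + 1 - N.length)).filter (fun j => decide (N <+: H.drop j))
          = (List.range (i + 1 - N.length)).filter (fun j => decide (N <+: H.drop j)) := by
      intro hMlt
      rcases Nat.lt_or_ge (i+1) N.length with hlt | hge
      · have heq : i + 1 + 1 - N.length = i + 1 - N.length := by omega
        rw [heq]
      · have hsplit : i + 1 + 1 - N.length = (i + 1 - N.length) + 1 := by omega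
        rw [hsplit, List.range_succ, List.filter_append]
        have hnot : ¬ (N <+: H.drop (i + 1 - N.length)) := by
          intro hocc
          have hsfx : N <:+ H.take (i+1) := (suffix_take_iff H N hge (by omega)).2 hocc
          have := hM3 N.length (le_refl _) (by rw [List.take_length]; exact hsfx)
          omega
        simp [hnot]
    have hsearch : searchStep H N (get_partial_match N) st i =
        (if H.getD i ' ' = N.getD j' ' ' then
          (if j' + 1 = N.length then
            (st.1 ++ [i + 1 - N.length], (get_partial_match N).getD (N.length - 1) 0)
           else (st.1, j' + 1))
         else (st.1, j')) := rfl
    rw [hfold, hsearch]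
    by_cases hc : H.getD i ' ' = N.getD j' ' '
    · rw [if_pos hc]
      have hMval : M = j' + 1 := by rw [hMdef, if_pos hc]
      by_cases hfull : j' + 1 = N.length
      · rw [if_pos hfull]
        dsimp only
        have hMm : M = N.length := by omega
        have hNsuf : N <:+ H.take (i+1) := by
          have h := hM2
          rw [hMm, List.take_length] at h
          exact h
        have hbm : (get_partial_match N).getD (N.length - 1) 0 = brd N N.length := by
          have := hpicor (N.length - 1) (by omega)
          rwa [show N.length - 1 + 1 = N.length by omega] at this
        have hmlei : N.length ≤ i + 1 := by
          have := hNsuf.length_le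
          simp [List.length_take] at this
          omega
        refine ⟨?_, ?_, ?_, ?_⟩
        · show (get_partial_match N).getD (N.length - 1) 0 < N.length
          rw [hbm]
          exact brd_lt N N.length hm1
        · show N.take ((get_partial_match N).getD (N.length - 1) 0) <:+ H.take (i+1)
          rw [hbm]
          exact (brd_suffix N N.length).trans (by rw [List.take_length]; exact hNsuf)
        · intro k hk hs
          show k ≤ (get_partial_match N).getD (N.length - 1) 0
          rw [hbm]
          apply le_brd N hk
          rw [List.take_length]
          exact List.suffix_of_suffix_length_le hs hNsuf (by simp [List.length_take])
        · show st.1 ++ [i + 1 - N.length] = _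
          have hocc : N <+: H.drop (i + 1 - N.length) :=
            (suffix_take_iff H N hmlei (by omega)).1 hNsuf
          have hsplit : i + 1 + 1 - N.length = (i + 1 - N.length) + 1 := by omega
          rw [hsplit, List.range_succ, List.filter_append, ih4]
          simp [hocc]
      · rw [if_neg hfull]
        dsimp only
        have hMlt : M < N.length := by omega
        refine ⟨by omega, by rw [← hMval]; exact hM2, ?_, by rw [hnogrow hMlt]; exact ih4⟩
        intro k hk hs
        have := hM3 k (by omega) hs
        omega
    · rw [if_neg hc]
      dsimp only
      have hMval : M = j' := by rw [hMdef, if_neg hc]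
      have hM0 : M = 0 := by
        rcases hM4 with h | h
        · exact h
        · exact absurd h hc
      refine ⟨by omega, by rw [← hMval]; exact hM2, ?_, by rw [hnogrow (by omega)]; exact ih4⟩
      intro k hk hs
      have := hM3 k (by omega) hs
      omega

-- A's kmp_search returns exactly the increasing list of all occurrence positions
lemma kmp_search_eq (H N : List Char) (hN : N ≠ []) :
    kmp_search H N = (List.range (H.length + 1 - N.length)).filter (fun j => decide (N <+: H.drop j)) :=
  (search_invariant H N hN H.length (le_refl _)).2.2.2

lemma headD_filter_range (p : Nat → Bool) (K j : Nat) (hj : j < K) (hp : p j = true)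
    (hmin : ∀ i, i < j → p i = false) : ((List.range K).filter p).headD 0 = j := by
  have hsplit : List.range K = List.range (j+1) ++ (List.range (K - (j+1))).map ((j+1) + ·) := by
    rw [← List.range_add]
    congr 1
    omega
  rw [hsplit, List.filter_append, List.range_succ, List.filter_append]
  have h0 : (List.range j).filter p = [] :=
    List.filter_eq_nil_iff.2 (fun a ha => by rw [hmin a (List.mem_range.mp ha)]; simp)
  rw [h0]
  simp [hp]

-- per pair: the first position reported by A's KMP is B's library first occurrence
lemma kmp_headD_eq_find (H N : List Char) (hN : N ≠ []) (hocc : N <:+: H) :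
    (((kmp_search H N).headD 0 : Nat) : Int) = PySem.Chars.find H N := by
  have hf0 : 0 ≤ PySem.Chars.find H N := (PySem.Chars.find_nonneg_iff H N).2 hocc
  obtain ⟨hpre, hmin⟩ := PySem.Chars.find_spec hf0
  have hm1 : 0 < N.length := List.length_pos_of_ne_nil hN
  have hfle : PySem.Chars.find H N ≤ (H.length : Int) := PySem.Chars.find_le_length H N
  have hfeq : ((PySem.Chars.find H N).toNat : Int) = PySem.Chars.find H N := Int.toNat_of_nonneg hf0
  have hfH : (PySem.Chars.find H N).toNat ≤ H.length := by omega
  have hlen : N.length ≤ H.length - (PySem.Chars.find H N).toNat := by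
    have := hpre.length_le
    rwa [List.length_drop] at this
  have hjK : (PySem.Chars.find H N).toNat < H.length + 1 - N.length := by omega
  rw [kmp_search_eq H N hN,
    headD_filter_range _ _ (PySem.Chars.find H N).toNat hjK (by simpa using hpre)
      (fun i hi => by simpa using hmin i hi)]
  exact hfeq

-- ===== VERDICT (by name: the statement is the Claim_ definition above) =====
theorem get_min_dial_cnt_spec : Claim_equal_get_min_dial_cnt := by
  intro states _ hpre
  unfold Spec_get_min_dial_cnt get_min_dial_cnt get_min_dial_cnt_alt
  apply PySem.List.foldl_congr_mem
  intro acc i hi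
  have hp := hpre i hi
  by_cases hpar : i % 2 = 0
  · rw [if_pos hpar] at hp
    simp only [if_pos hpar]
    rw [kmp_headD_eq_find _ _ hp.1 hp.2]
  · rw [if_neg hpar] at hp
    simp only [if_neg hpar]
    rw [kmp_headD_eq_find _ _ hp.1 hp.2]
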